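-- pv_equiv track=rewrite | github.com/sonya75/pyEvony | actionfactory/builder.py | isBuildTime5MinOrLess
-- ===== SOURCE A (Python) =====
-- buildingbasetime = [0,75,300,600,45,60,90,30,0,0,0,0,0,0,0,0,0,0,0,0,270,240,180,750,3600,480,540,360,720,150,450,1800,1800]
--
-- def isBuildTime5MinOrLess(param1,param2):
-- 	if (param1 == 27)&(param2 == 1):
-- 		return True
-- 	if (param1<0)|(param1>=len(buildingbasetime)):
-- 		return False
-- 	if (buildingbasetime[param1] == 0):
-- 		return False
-- 	x=buildingbasetime[param1]
-- 	y=1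
-- 	while y<param2:
-- 		x = x * 2
-- 		y=y+1
-- 	return (x <= 300)
-- ===== SOURCE B (Python) =====
-- buildingbasetime = [0,75,300,600,45,60,90,30,0,0,0,0,0,0,0,0,0,0,0,0,270,240,180,750,3600,480,540,360,720,150,450,1800,1800]
--
-- def isBuildTime5MinOrLess(param1, param2):
--     if (param1 == 27) & (param2 == 1):
--         return True
--     if (param1 < 0) | (param1 >= len(buildingbasetime)):
--         return False
--     base = buildingbasetime[param1]
--     if base == 0:
--         return False
--     return base * 2 ** max(param2 - 1, 0) <= 300
-- ===== Notes on version B (the rewrite author's own statement) =====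
-- stated objective: simpler
-- what changed: Replaced the while-loop doubling with the closed form base * 2 ** max(param2 - 1, 0) <= 300.
import Mathlib
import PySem

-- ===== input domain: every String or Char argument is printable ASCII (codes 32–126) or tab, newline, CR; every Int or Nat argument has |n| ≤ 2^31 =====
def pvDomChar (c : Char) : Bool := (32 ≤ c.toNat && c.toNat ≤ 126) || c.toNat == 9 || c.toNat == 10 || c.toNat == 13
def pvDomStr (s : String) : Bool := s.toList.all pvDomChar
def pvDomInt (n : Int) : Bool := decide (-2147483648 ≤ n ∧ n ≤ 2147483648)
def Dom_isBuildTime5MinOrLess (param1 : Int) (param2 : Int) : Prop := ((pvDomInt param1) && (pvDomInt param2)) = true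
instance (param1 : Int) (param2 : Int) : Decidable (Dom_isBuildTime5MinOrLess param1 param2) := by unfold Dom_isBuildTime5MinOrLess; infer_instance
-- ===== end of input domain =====

-- B replaces A's while-loop doubling with the closed form base * 2 ^ max(param2-1, 0); objective: simpler.

-- ===== PORT A =====
def buildingbasetime : List Int := [0,75,300,600,45,60,90,30,0,0,0,0,0,0,0,0,0,0,0,0,270,240,180,750,3600,480,540,360,720,150,450,1800,1800]

-- the while loop: x doubles while y < param2
def pvLoopA (x : Int) (y : Int) (param2 : Int) : Int :=
  if y < param2 then pvLoopA (x * 2) (y + 1) param2 else x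
  termination_by (param2 - y).toNat
  decreasing_by omega

def isBuildTime5MinOrLess (param1 : Int) (param2 : Int) : Bool :=
  if param1 == 27 && param2 == 1 then true
  else if param1 < 0 || param1 ≥ (buildingbasetime.length : Int) then false
  else
    -- index is in range here (guard above), so getD's default is never used
    let b := (PySem.List.pyGet? buildingbasetime param1).getD 0
    if b == 0 then false
    else decide (pvLoopA b 1 param2 ≤ 300)

-- ===== PORT B =====
def isBuildTime5MinOrLess_alt (param1 : Int) (param2 : Int) : Bool :=
  if param1 == 27 && param2 == 1 then true
  else if param1 < 0 || param1 ≥ (buildingbasetime.length : Int) then false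
  else
    -- index is in range here (guard above), so getD's default is never used
    let base := (PySem.List.pyGet? buildingbasetime param1).getD 0
    if base == 0 then false
    else decide (base * 2 ^ (max (param2 - 1) 0).toNat ≤ 300)

-- ===== PRECONDITION & SPEC =====
def Spec_isBuildTime5MinOrLess (param1 : Int) (param2 : Int) (out : Bool) : Prop := out = isBuildTime5MinOrLess_alt param1 param2
instance (param1 : Int) (param2 : Int) (out : Bool) : Decidable (Spec_isBuildTime5MinOrLess param1 param2 out) := by unfold Spec_isBuildTime5MinOrLess; infer_instance

-- ===== CLAIM (what is proved, stated in full; the proofs are below) =====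
def Claim_equal_isBuildTime5MinOrLess : Prop := ∀ (param1 : Int) (param2 : Int), Dom_isBuildTime5MinOrLess param1 param2 → Spec_isBuildTime5MinOrLess param1 param2 (isBuildTime5MinOrLess param1 param2)

-- ===== LEMMAS AND PROOFS =====

theorem pvLoopA_closed (n : ℕ) : ∀ (x y p : Int), (p - y).toNat = n → pvLoopA x y p = x * 2 ^ n := by
  induction n with
  | zero =>
    intro x y p h
    rw [pvLoopA]
    have : ¬ y < p := by omega
    simp [this]
  | succ k ih =>
    intro x y p h
    rw [pvLoopA]
    have hy : y < p := by omega
    have hk : (p - (y + 1)).toNat = k := by omega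
    rw [if_pos hy, ih (x * 2) (y + 1) p hk]
    ring

theorem pvLoopA_one (b p : Int) : pvLoopA b 1 p = b * 2 ^ (max (p - 1) 0).toNat := by
  exact pvLoopA_closed _ b 1 p (by omega)

-- ===== VERDICT (by name: the statement is the Claim_ definition above) =====
theorem isBuildTime5MinOrLess_spec : Claim_equal_isBuildTime5MinOrLess := by
  intro p1 p2 _
  unfold Spec_isBuildTime5MinOrLess isBuildTime5MinOrLess isBuildTime5MinOrLess_alt
  simp only [pvLoopA_one]
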